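-- pv_equiv track=rewrite | github.com/goodmike31/itl2-class-materials | notebooks/7 - Text manipulation/manip12.py | consonant
-- ===== SOURCE A (Python) =====
-- def consonant(s,i):
-- 	letter = s[i]
-- 	if letter in 'aeiou':
-- 		return False
-- 	elif letter == 'y' and i == 0:
-- 		return True
-- 	elif letter == 'y' and consonant(s,i-1):
-- 		return False
-- 	else:
-- 		return True
-- ===== SOURCE B (Python) =====
-- def consonant(s, i):
--     # count the run of 'y's walking left from i (stopping before index 0)
--     k = 0
--     while s[i - k] == 'y' and (i - k) != 0:
--         k += 1
--     base = s[i - k] not in 'aeiou'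
--     return base != (k % 2 == 1)
-- ===== Notes on version B (the rewrite author's own statement) =====
-- stated objective: alternative
-- what changed: Replaces A's self-recursion (negating at each 'y') by first measuring the length k of the leftward run of 'y's, then computing the answer once as the base value at the stop character XORed with the parity of k.
import Mathlib
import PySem

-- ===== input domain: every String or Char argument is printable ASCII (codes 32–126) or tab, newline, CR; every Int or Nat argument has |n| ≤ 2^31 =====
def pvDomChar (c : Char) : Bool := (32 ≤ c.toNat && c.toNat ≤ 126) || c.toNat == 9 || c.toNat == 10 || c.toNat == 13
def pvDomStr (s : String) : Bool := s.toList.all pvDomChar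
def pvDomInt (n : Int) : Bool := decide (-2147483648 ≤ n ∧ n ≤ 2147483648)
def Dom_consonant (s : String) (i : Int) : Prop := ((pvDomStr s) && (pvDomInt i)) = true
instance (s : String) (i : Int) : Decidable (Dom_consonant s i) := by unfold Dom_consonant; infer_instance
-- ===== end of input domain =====

-- B replaces A's self-recursion (which negates the recursive result at each 'y') by two stages:
-- first measure the length k of the leftward run of 'y's, then return the base value at the
-- stop character XORed once with the parity of k.

-- termination helper shared by both ports: a successful pyGet? means the index is in range
theorem pvInRange_of_pyGet? (cs : List Char) (i : Int) (c : Char)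
    (h : PySem.List.pyGet? cs i = some c) : -(cs.length : Int) ≤ i ∧ i < cs.length := by
  have hin : PySem.Raise.InRange cs.length i := by
    by_contra hc
    rw [← PySem.List.pyGet?_eq_none_iff] at hc
    simp [hc] at h
  exact hin

-- ===== PORT A =====
-- literal port of A's recursion; the `none` case of s[i] is Python's IndexError (excluded by Pre_)
def consonantCore (cs : List Char) (i : Int) : Bool :=
  match h : PySem.List.pyGet? cs i with
  | none => false
  | some letter =>
    if letter ∈ ['a', 'e', 'i', 'o', 'u'] then false
    else if letter = 'y' ∧ i = 0 then true
    else if letter = 'y' then (if consonantCore cs (i - 1) then false else true)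
    else true
termination_by (i + cs.length + 1).toNat
decreasing_by
  have := pvInRange_of_pyGet? cs i _ h
  omega

def consonant (s : String) (i : Int) : Bool := consonantCore s.toList i

-- ===== PORT B =====
-- the while-loop of Source B: length of the leftward run of 'y's starting at i (stopping before 0);
-- a `none` from pyGet? is Python's IndexError (excluded by Pre_)
def yRun (cs : List Char) (i : Int) : Nat :=
  match h : PySem.List.pyGet? cs i with
  | none => 0
  | some c =>
    if c = 'y' ∧ i ≠ 0 then yRun cs (i - 1) + 1 else 0
termination_by (i + cs.length + 1).toNat
decreasing_by
  have := pvInRange_of_pyGet? cs i _ h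
  omega

def consonant_alt (s : String) (i : Int) : Bool :=
  let k := yRun s.toList i
  match PySem.List.pyGet? s.toList (i - k) with
  | none => false
  | some c => Bool.xor (decide (c ∉ ['a', 'e', 'i', 'o', 'u'])) (decide (k % 2 = 1))

-- ===== PRECONDITION & SPEC =====
-- Pre_ excludes exactly the inputs where Python A raises IndexError: an initial index out of
-- range, or a negative index whose leftward chain of 'y's runs off the left end of the string.
def Pre_consonant (s : String) (i : Int) : Prop :=
  PySem.Raise.InRange s.toList.length i ∧
    (0 ≤ i ∨ ¬ (s.toList.take (i + s.toList.length + 1).toNat).all (· = 'y'))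
instance (s : String) (i : Int) : Decidable (Pre_consonant s i) := by
  unfold Pre_consonant; infer_instance

def pvWitness_consonant : String × Int := ("by", 1)

def Spec_consonant (s : String) (i : Int) (out : Bool) : Prop := out = consonant_alt s i
instance (s : String) (i : Int) (out : Bool) : Decidable (Spec_consonant s i out) := by
  unfold Spec_consonant; infer_instance

-- ===== CLAIM (what is proved, stated in full; the proofs are below) =====
def Claim_equal_consonant : Prop :=
  ∀ (s : String) (i : Int), Dom_consonant s i → Pre_consonant s i →
    Spec_consonant s i (consonant s i)

-- ===== LEMMAS AND PROOFS =====

-- pyGet? on an in-range negative index, in getElem? form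
theorem pyGet?_neg_eq (cs : List Char) (i : Int) (h1 : -(cs.length : Int) ≤ i) (h2 : i < 0) :
    PySem.List.pyGet? cs i = cs[(i + cs.length).toNat]? := by
  simp only [PySem.List.pyGet?, PySem.List.pyIdx?, if_neg (by omega : ¬ 0 ≤ i), if_pos h1]
  have : cs.length - (-i).toNat = (i + cs.length).toNat := by omega
  simp [this]

-- main invariant: the run stops on a readable character, and A's recursion equals
-- B's "run length + parity" computation
theorem core_eq_run (cs : List Char) :
    ∀ n (i : Int), (i + cs.length + 1).toNat = n →
      PySem.Raise.InRange cs.length i →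
      (0 ≤ i ∨ ¬ (cs.take (i + cs.length + 1).toNat).all (· = 'y')) →
      (PySem.List.pyGet? cs (i - yRun cs i)).isSome = true ∧
      consonantCore cs i =
        (match PySem.List.pyGet? cs (i - yRun cs i) with
         | none => false
         | some c => Bool.xor (decide (c ∉ ['a', 'e', 'i', 'o', 'u']))
                              (decide (yRun cs i % 2 = 1))) := by
  intro n
  induction n using Nat.strong_induction_on with
  | _ n IH =>
    intro i hn hin hpre
    have hbnd : -(cs.length : Int) ≤ i ∧ i < cs.length := hin
    have hlo := hbnd.1
    have hhi := hbnd.2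
    rw [consonantCore]
    cases hg : PySem.List.pyGet? cs i with
    | none => exfalso; rw [PySem.List.pyGet?_eq_none_iff] at hg; exact hg hin
    | some letter =>
      by_cases hy : letter = 'y' ∧ i ≠ 0
      · -- the recursive / counting step
        have hrun : yRun cs i = yRun cs (i - 1) + 1 := by
          rw [yRun]
          cases hg2 : PySem.List.pyGet? cs i with
          | none => rw [hg2] at hg; cases hg
          | some c => rw [hg2] at hg; injection hg with he; subst he; simp [hy.1, hy.2]
        have hvne : letter ∉ ['a', 'e', 'i', 'o', 'u'] := by simp [hy.1]
        simp only [if_neg hvne, if_neg (by simp [hy.2] : ¬ (letter = 'y' ∧ i = 0)),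
          if_pos hy.1]
        -- the smaller index still satisfies the precondition
        have step : PySem.Raise.InRange cs.length (i - 1) ∧
            (0 ≤ i - 1 ∨ ¬ (cs.take ((i - 1) + cs.length + 1).toNat).all (· = 'y')) := by
          by_cases hneg : i < 0
          case pos =>
            set pos := (i + cs.length).toNat with hpos_def
            have hget : cs[pos]? = some letter := by
              rw [pyGet?_neg_eq cs i hlo hneg] at hg; exact hg
            have hposlt : pos < cs.length := by omega
            have hcy : cs[pos]? = some 'y' := hy.1 ▸ hget
            have hall : ¬ (cs.take (pos + 1)).all (· = 'y') := by
              have := hpre.resolve_left (by omega)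
              have heq : (i + cs.length + 1).toNat = pos + 1 := by omega
              rwa [heq] at this
            have hpos1 : 1 ≤ pos := by
              by_contra hc
              have h0 : pos = 0 := by omega
              apply hall
              rw [h0] at hcy ⊢
              rw [List.take_add_one]
              simp [hcy]
            refine ⟨⟨by omega, by omega⟩, Or.inr ?_⟩
            have heq : ((i - 1) + cs.length + 1).toNat = pos := by omega
            rw [heq]
            intro hallpos
            apply hall
            rw [List.take_add_one, List.all_append]
            simp [hallpos, hcy]
          case neg => exact ⟨⟨by omega, by omega⟩, Or.inl (by omega)⟩
        have key := IH (i + cs.length).toNat (by omega) (i - 1) (by omega) step.1 step.2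
        have hidx : i - ((yRun cs (i - 1) + 1 : Nat) : Int) = (i - 1) - yRun cs (i - 1) := by
          push_cast; ring
        rw [hrun, hidx, key.2]
        cases hstop : PySem.List.pyGet? cs ((i - 1) - yRun cs (i - 1)) with
        | none => exact absurd key.1 (by simp [hstop])
        | some c =>
          refine ⟨by simp, ?_⟩
          have hpar : decide ((yRun cs (i - 1) + 1) % 2 = 1)
              = !(decide (yRun cs (i - 1) % 2 = 1)) := by
            by_cases hp : yRun cs (i - 1) % 2 = 1
            · have h0 : (yRun cs (i - 1) + 1) % 2 = 0 := by omega
              simp [hp, h0]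
            · have h1 : (yRun cs (i - 1) + 1) % 2 = 1 := by omega
              simp [hp, h1]
          rw [hpar]
          cases decide (c ∉ ['a', 'e', 'i', 'o', 'u']) <;>
            cases decide (yRun cs (i - 1) % 2 = 1) <;> simp [Bool.xor]
      · -- a stopping letter: run length is 0, B reads the same character
        have hrun : yRun cs i = 0 := by
          rw [yRun]
          cases hg2 : PySem.List.pyGet? cs i with
          | none => rfl
          | some c => rw [hg2] at hg; injection hg with he; subst he; simp [hy]
        rw [hrun]
        simp only [Nat.cast_zero, sub_zero, hg]
        refine ⟨by simp, ?_⟩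
        by_cases hv : letter ∈ ['a', 'e', 'i', 'o', 'u']
        · simp [hv]
        · by_cases hy0 : letter = 'y' ∧ i = 0
          · simp [hy0]
          · have hny : letter ≠ 'y' := by
              intro he; exact hy ⟨he, fun h0 => hy0 ⟨he, h0⟩⟩
            simp [hv, hny]

-- ===== VERDICT (by name: the statement is the Claim_ definition above) =====
theorem consonant_spec : Claim_equal_consonant := by
  intro s i _hdom hpre
  unfold Spec_consonant consonant consonant_alt
  exact (core_eq_run s.toList _ i rfl hpre.1 hpre.2).2
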